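-- pv_equiv track=rewrite | github.com/najibullahjafari/Codeforces-solutions | solved_problems/1851b.py | can_sort_by_parity
-- ===== SOURCE A (Python) =====
-- def can_sort_by_parity(n, a):
--     even = [x for x in a if x % 2 == 0]
--     odd = [x for x in a if x % 2 != 0]
--
--     even.sort()
--     odd.sort()
--
--     sorted_a = []
--     even_index = 0
--     odd_index = 0
--
--     for x in a:
--         if x % 2 == 0:
--             sorted_a.append(even[even_index])
--             even_index += 1
--         else:
--             sorted_a.append(odd[odd_index])
--             odd_index += 1
--
--     return sorted_a == sorted(a)
-- ===== SOURCE B (Python) =====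
-- def can_sort_by_parity(n, a):
--     # Parity pattern of a must be preserved by the full sort: within each
--     # parity class the elements of sorted(a) are already in order, so the
--     # parity-constrained rearrangement equals sorted(a) exactly when sorted(a)
--     # keeps even/odd values at the same positions as a.
--     s = sorted(a)
--     return [x % 2 for x in a] == [x % 2 for x in s]
-- ===== Notes on version B (the rewrite author's own statement) =====
-- stated objective: simpler
-- what changed: Instead of splitting into even/odd lists, sorting each half and re-placing them position by position, B sorts once and compares the parity pattern of a with that of sorted(a).
import Mathlib
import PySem

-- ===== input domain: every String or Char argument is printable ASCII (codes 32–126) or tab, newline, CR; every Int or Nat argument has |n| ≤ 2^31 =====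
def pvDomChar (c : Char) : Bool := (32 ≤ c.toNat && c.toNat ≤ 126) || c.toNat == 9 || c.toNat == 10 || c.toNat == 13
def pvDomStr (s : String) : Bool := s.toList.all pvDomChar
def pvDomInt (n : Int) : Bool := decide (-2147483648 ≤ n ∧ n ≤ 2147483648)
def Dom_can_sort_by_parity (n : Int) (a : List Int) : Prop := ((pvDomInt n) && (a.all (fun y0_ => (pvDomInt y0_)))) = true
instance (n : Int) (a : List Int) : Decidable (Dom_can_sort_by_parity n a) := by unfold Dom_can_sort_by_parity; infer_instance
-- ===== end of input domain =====

-- B replaces A's even/odd split, two sorts and re-placement loop by one sort and a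
-- comparison of parity patterns (objective: simpler).

-- ===== PORT A =====
-- split into evens/odds, sort each, re-place them at the original parity positions,
-- compare with sorted(a).  The indices even_index/odd_index are always in range in
-- Python (they count evens/odds seen so far), so getD's default 0 is never read.
def can_sort_by_parity (n : Int) (a : List Int) : Bool :=
  let even := a.filter (fun x => PySem.Int.mod x 2 == 0)
  let odd := a.filter (fun x => PySem.Int.mod x 2 != 0)
  let evenS := PySem.List.sorted even (fun x => x) false
  let oddS := PySem.List.sorted odd (fun x => x) false
  let st := a.foldl (fun (st : List Int × Nat × Nat) x =>
    if PySem.Int.mod x 2 == 0 then (st.1 ++ [evenS.getD st.2.1 0], st.2.1 + 1, st.2.2)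
    else (st.1 ++ [oddS.getD st.2.2 0], st.2.1, st.2.2 + 1)) ([], 0, 0)
  st.1 == PySem.List.sorted a (fun x => x) false

-- ===== PORT B =====
-- sort once; equal iff the parity pattern of a matches that of sorted(a)
def can_sort_by_parity_alt (n : Int) (a : List Int) : Bool :=
  let s := PySem.List.sorted a (fun x => x) false
  a.map (fun x => PySem.Int.mod x 2) == s.map (fun x => PySem.Int.mod x 2)

-- ===== PRECONDITION & SPEC =====
def Spec_can_sort_by_parity (n : Int) (a : List Int) (out : Bool) : Prop := out = can_sort_by_parity_alt n a
instance (n : Int) (a : List Int) (out : Bool) : Decidable (Spec_can_sort_by_parity n a out) := by unfold Spec_can_sort_by_parity; infer_instance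

-- ===== CLAIM (what is proved, stated in full; the proofs are below) =====
def Claim_equal_can_sort_by_parity : Prop := ∀ (n : Int) (a : List Int), Dom_can_sort_by_parity n a → Spec_can_sort_by_parity n a (can_sort_by_parity n a)

-- ===== LEMMAS AND PROOFS =====

-- A's placement loop, with the two sorted pools consumed from the front
def ilv (p : Int → Bool) : List Int → List Int → List Int → List Int
  | [], _, _ => []
  | x :: xs, ev, od =>
    if p x then ev.headD 0 :: ilv p xs ev.tail od
    else od.headD 0 :: ilv p xs ev od.tail

theorem fold_eq_ilv (p : Int → Bool) (evenS oddS : List Int) : ∀ (xs acc : List Int) (ei oi : Nat),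
    (xs.foldl (fun (st : List Int × Nat × Nat) x =>
      if p x then (st.1 ++ [evenS.getD st.2.1 0], st.2.1 + 1, st.2.2)
      else (st.1 ++ [oddS.getD st.2.2 0], st.2.1, st.2.2 + 1)) (acc, ei, oi)).1
    = acc ++ ilv p xs (evenS.drop ei) (oddS.drop oi) := by
  intro xs
  induction xs with
  | nil => intro acc ei oi; simp [ilv]
  | cons x xs ih =>
    intro acc ei oi
    cases hb : p x
    · simp only [List.foldl_cons, hb, Bool.false_eq_true, if_false, ih, ilv]
      rw [List.headD_eq_head?_getD, List.head?_drop, List.getD_eq_getElem?_getD,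
        List.tail_drop, List.append_assoc, List.singleton_append]
    · simp only [List.foldl_cons, hb, if_true, ih, ilv]
      rw [List.headD_eq_head?_getD, List.head?_drop, List.getD_eq_getElem?_getD,
        List.tail_drop, List.append_assoc, List.singleton_append]

-- the three invariants of the placement loop, proved together
theorem ilv_props (p : Int → Bool) : ∀ (xs ev od : List Int),
    (∀ x ∈ ev, p x = true) → (∀ x ∈ od, p x = false) →
    ev.length = (xs.filter p).length →
    od.length = (xs.filter (fun x => !p x)).length →
    (ilv p xs ev od).map p = xs.map p
    ∧ (ilv p xs ev od).filter p = ev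
    ∧ (ilv p xs ev od).filter (fun x => !p x) = od := by
  intro xs
  induction xs with
  | nil =>
    intro ev od _ _ hel hol
    simp only [List.filter_nil, List.length_nil, List.length_eq_zero_iff] at hel hol
    subst hel; subst hol
    simp [ilv]
  | cons x xs ih =>
    intro ev od hev hod hel hol
    cases hb : p x
    · -- odd head: od must be nonempty
      cases od with
      | nil =>
        rw [List.filter_cons_of_pos (by simp [hb])] at hol
        simp at hol
      | cons o od' =>
        rw [List.filter_cons_of_pos (by simp [hb])] at hol
        rw [List.filter_cons_of_neg (by simp [hb])] at hel
        have ho : p o = false := hod o (by simp)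
        have hrec := ih ev od' hev (fun y hy => hod y (by simp [hy])) hel
          (by simpa using hol)
        refine ⟨?_, ?_, ?_⟩
        · simp only [ilv, hb, Bool.false_eq_true, if_false, List.headD_cons, List.tail_cons,
            List.map_cons, hrec.1, ho]
        · simp only [ilv, hb, Bool.false_eq_true, if_false, List.headD_cons, List.tail_cons]
          rw [List.filter_cons_of_neg (by simp [ho]), hrec.2.1]
        · simp only [ilv, hb, Bool.false_eq_true, if_false, List.headD_cons, List.tail_cons]
          rw [List.filter_cons_of_pos (by simp [ho]), hrec.2.2]
    · -- even head: ev must be nonempty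
      cases ev with
      | nil =>
        rw [List.filter_cons_of_pos (by simp [hb])] at hel
        simp at hel
      | cons e ev' =>
        rw [List.filter_cons_of_pos (by simp [hb])] at hel
        rw [List.filter_cons_of_neg (by simp [hb])] at hol
        have he : p e = true := hev e (by simp)
        have hrec := ih ev' od (fun y hy => hev y (by simp [hy])) hod
          (by simpa using hel) hol
        refine ⟨?_, ?_, ?_⟩
        · simp only [ilv, hb, if_true, List.headD_cons, List.tail_cons,
            List.map_cons, hrec.1, he]
        · simp only [ilv, hb, if_true, List.headD_cons, List.tail_cons]
          rw [List.filter_cons_of_pos (by simp [he]), hrec.2.1]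
        · simp only [ilv, hb, if_true, List.headD_cons, List.tail_cons]
          rw [List.filter_cons_of_neg (by simp [he]), hrec.2.2]

-- a list is determined by its p-pattern together with its p- and ¬p-subsequences
theorem pattern_unique (p : Int → Bool) : ∀ (l1 l2 : List Int),
    l1.filter p = l2.filter p →
    l1.filter (fun x => !p x) = l2.filter (fun x => !p x) →
    l1.map p = l2.map p →
    l1 = l2 := by
  intro l1
  induction l1 with
  | nil =>
    intro l2 _ _ hm
    cases l2 with
    | nil => rfl
    | cons y ys => simp at hm
  | cons x xs ih =>
    intro l2 hfe hfo hm
    cases l2 with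
    | nil => simp at hm
    | cons y ys =>
      simp only [List.map_cons, List.cons.injEq] at hm
      cases hb : p x
      · have hy : p y = false := by rw [← hm.1]; exact hb
        rw [List.filter_cons_of_neg (by simp [hb]), List.filter_cons_of_neg (by simp [hy])] at hfe
        rw [List.filter_cons_of_pos (by simp [hb]), List.filter_cons_of_pos (by simp [hy])] at hfo
        simp only [List.cons.injEq] at hfo
        rw [hfo.1, ih ys hfe hfo.2 hm.2]
      · have hy : p y = true := by rw [← hm.1]; exact hb
        rw [List.filter_cons_of_pos (by simp [hb]), List.filter_cons_of_pos (by simp [hy])] at hfe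
        rw [List.filter_cons_of_neg (by simp [hb]), List.filter_cons_of_neg (by simp [hy])] at hfo
        simp only [List.cons.injEq] at hfe
        rw [hfe.1, ih ys hfe.2 hfo hm.2]

-- filter commutes with the full sort: sorted(filter) = filter(sorted)
theorem sorted_filter_comm (a : List Int) (p : Int → Bool) :
    PySem.List.sorted (a.filter p) (fun x => x) false
      = (PySem.List.sorted a (fun x => x) false).filter p := by
  apply PySem.List.eq_of_perm_of_pairwise_le_of_injective (fun x : Int => x)
    (fun _ _ h => h)
  · exact (PySem.List.sorted_perm (a.filter p) (fun x => x) false).trans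
      ((PySem.List.sorted_perm a (fun x => x) false).filter p).symm
  · exact PySem.List.sorted_pairwise (a.filter p) (fun x => x)
  · exact (PySem.List.sorted_pairwise a (fun x => x)).filter p

-- x % 2 is 0 or 1, so it is determined by the Boolean parity test
theorem mod_two_fun_eq :
    (fun x : Int => PySem.Int.mod x 2)
      = (fun b : Bool => if b then (0 : Int) else 1) ∘ (fun x : Int => PySem.Int.mod x 2 == 0) := by
  funext x
  rcases PySem.Int.mod_two_eq x with h | h <;> simp only [Function.comp_apply, h] <;> rfl

theorem map_mod_eq_iff (l1 l2 : List Int) :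
    l1.map (fun x => PySem.Int.mod x 2) = l2.map (fun x => PySem.Int.mod x 2)
      ↔ l1.map (fun x => PySem.Int.mod x 2 == 0) = l2.map (fun x => PySem.Int.mod x 2 == 0) := by
  constructor
  · intro h
    have : ∀ l : List Int, l.map (fun x => PySem.Int.mod x 2 == 0)
        = (l.map (fun x => PySem.Int.mod x 2)).map (fun v => v == 0) := by
      intro l; rw [List.map_map]; rfl
    rw [this, this, h]
  · intro h
    rw [mod_two_fun_eq, ← List.map_map, ← List.map_map, h]

-- ===== VERDICT (by name: the statement is the Claim_ definition above) =====
theorem can_sort_by_parity_spec : Claim_equal_can_sort_by_parity := by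
  intro n a _
  unfold Spec_can_sort_by_parity can_sort_by_parity can_sort_by_parity_alt
  simp only []
  set pe : Int → Bool := fun x => PySem.Int.mod x 2 == 0 with hpe
  set po : Int → Bool := fun x => PySem.Int.mod x 2 != 0 with hpo
  have hpo' : po = fun x => !pe x := rfl
  set E := PySem.List.sorted (a.filter pe) (fun x => x) false with hEdef
  set O := PySem.List.sorted (a.filter po) (fun x => x) false with hOdef
  set s := PySem.List.sorted a (fun x => x) false with hsdef
  rw [fold_eq_ilv pe E O a [] 0 0]
  simp only [List.drop_zero, List.nil_append]
  have hE1 : ∀ x ∈ E, pe x = true := by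
    intro x hx
    rw [hEdef, PySem.List.mem_sorted] at hx
    exact List.of_mem_filter hx
  have hO1 : ∀ x ∈ O, pe x = false := by
    intro x hx
    rw [hOdef, PySem.List.mem_sorted] at hx
    have := List.of_mem_filter hx
    rw [hpo'] at this
    simpa using this
  have hElen : E.length = (a.filter pe).length := by
    rw [hEdef, PySem.List.length_sorted]
  have hOlen : O.length = (a.filter (fun x => !pe x)).length := by
    rw [hOdef, PySem.List.length_sorted, hpo']
  have hprops := ilv_props pe a E O hE1 hO1 hElen hOlen
  have hsE : s.filter pe = E := (sorted_filter_comm a pe).symm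
  have hsO : s.filter (fun x => !pe x) = O := by
    rw [hOdef, hpo', sorted_filter_comm a]
  rw [Bool.eq_iff_iff]
  simp only [beq_iff_eq]
  rw [map_mod_eq_iff]
  constructor
  · intro hilv
    rw [← hprops.1, hilv]
  · intro hmap
    apply pattern_unique pe
    · rw [hprops.2.1, hsE]
    · rw [hprops.2.2, hsO]
    · rw [hprops.1, hmap]
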